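-- pv_equiv track=rewrite | github.com/tazmanianDeviloper/CS111 | Man & Khaleh/ps3pr2.py | most_consonants
-- ===== SOURCE A (Python) =====
-- def num_vowels(s):
--     """ returns the number of vowels in the string s
--         input: s is a string of 0 or more lowercase letters
--     """
--     if s == '':
--         return 0
--     else:
--         num_in_rest = num_vowels(s[1:])
--         if s[0] in 'aeiou':
--             return 1 + num_in_rest
--         else:
--             return 0 + num_in_rest
--
-- def most_consonants(words):
--     """If there are no words in the list then there is nothing to count consonants for.
-- The base case, there for, shall be an empty string. Actual inputs will be reduced to 0,
-- on the first itteration in recursion the first input is saved as the stored_value. from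
-- then, in every other itteration, the length of the first index is measured against the length
-- of the stored_value."""
--     if len(words)==0:
--         return ''
--     else:
--         stored_value=most_consonants(words[1:])
--         if len(words)==1:
--             stored_value=words[0]
--             return stored_value
--         else:
--             if len(stored_value)-(num_vowels(stored_value))>=len(words[0])-(num_vowels(words[0])):
--                 return stored_value
--             else:
--                 return words[0]
-- ===== SOURCE B (Python) =====
-- def most_consonants(words):
--     if not words:
--         return ''
--     def consonant_count(w):
--         return len(w) - sum(c in 'aeiou' for c in w)
--     return sorted(words, key=consonant_count)[-1]
-- ===== Notes on version B (the rewrite author's own statement) =====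
-- stated objective: faster
-- what changed: Replaces the double recursion (recursive vowel count with string slicing inside a recursive scan over list slices) by a per-word arithmetic consonant count and one stable ascending sort, taking the last element, whose stability reproduces the later-word-wins tie-break.
import Mathlib
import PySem

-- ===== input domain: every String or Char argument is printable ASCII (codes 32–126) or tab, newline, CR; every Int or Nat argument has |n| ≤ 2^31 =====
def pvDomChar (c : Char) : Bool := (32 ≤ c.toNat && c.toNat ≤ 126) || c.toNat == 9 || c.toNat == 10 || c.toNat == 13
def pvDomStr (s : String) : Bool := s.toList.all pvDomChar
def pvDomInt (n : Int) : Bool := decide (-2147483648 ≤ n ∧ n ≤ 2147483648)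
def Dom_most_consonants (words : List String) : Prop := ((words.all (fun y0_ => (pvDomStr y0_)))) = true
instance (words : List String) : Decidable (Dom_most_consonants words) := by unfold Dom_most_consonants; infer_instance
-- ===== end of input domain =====

-- B replaces A's double recursion (recursive vowel count over string slices inside a recursive
-- scan over list slices) by a per-word consonant count and one stable ascending sort whose last
-- element is A's later-wins maximum; objective: faster.


-- ===== PORT A =====
-- num_vowels: the recursion on s[1:] / s[0] is carried out on the char list (exact for every string)
def numVowelsC : List Char → Int
  | [] => 0
  | c :: rest =>
      let numInRest := numVowelsC rest
      if c ∈ "aeiou".toList then 1 + numInRest else 0 + numInRest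

def num_vowels (s : String) : Int := numVowelsC s.toList

def most_consonants : List String → String
  | [] => ""
  | w :: rest =>
      let stored := most_consonants rest
      if rest = [] then w       -- len(words) == 1
      else if PySem.Str.len stored - num_vowels stored ≥ PySem.Str.len w - num_vowels w
        then stored else w

-- ===== PORT B =====
-- consonant_count(w) = len(w) - sum(c in 'aeiou' for c in w)
def ccount (w : String) : Int :=
  PySem.Str.len w - (w.toList.map (fun c => if c ∈ "aeiou".toList then (1 : Int) else 0)).sum

def most_consonants_alt (words : List String) : String :=
  if words = [] then ""
  else PySem.List.pyGetD (PySem.List.sorted words ccount false) (-1) ""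

-- ===== PRECONDITION & SPEC =====
def Spec_most_consonants (words : List String) (out : String) : Prop := out = most_consonants_alt words
instance (words : List String) (out : String) : Decidable (Spec_most_consonants words out) := by unfold Spec_most_consonants; infer_instance

-- ===== CLAIM (what is proved, stated in full; the proofs are below) =====
def Claim_equal_most_consonants : Prop := ∀ (words : List String), Dom_most_consonants words → Spec_most_consonants words (most_consonants words)

-- ===== LEMMAS AND PROOFS =====

-- the later-wins choice step and the left-fold running best (proof-only helpers)
def gstep (b x : String) : String := if ccount b ≤ ccount x then x else b
def Gbest (b : String) (xs : List String) : String := xs.foldl gstep b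

lemma ccA_eq_ccount (w : String) :
    PySem.Str.len w - num_vowels w = ccount w := by
  have h : ∀ cs : List Char,
      numVowelsC cs = (cs.map (fun c => if c ∈ "aeiou".toList then (1 : Int) else 0)).sum := by
    intro cs
    induction cs with
    | nil => simp [numVowelsC]
    | cons c rest ih =>
        simp [numVowelsC, ih]; split <;> omega
  simp [num_vowels, ccount, h]

lemma G_choice (xs : List String) : ∀ w x : String,
    (if ccount w ≤ ccount (Gbest x xs) then Gbest x xs else w)
      = Gbest (if ccount w ≤ ccount x then x else w) xs := by
  induction xs with
  | nil => intro w x; simp [Gbest]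
  | cons y ys ih =>
      intro w x
      show (if ccount w ≤ ccount (Gbest (gstep x y) ys) then Gbest (gstep x y) ys else w)
            = Gbest (gstep (if ccount w ≤ ccount x then x else w) y) ys
      rw [ih w (gstep x y)]
      congr 1
      simp only [gstep]
      split_ifs <;> first | rfl | omega

lemma A_eq_Gbest : ∀ (rest : List String) (w : String),
    most_consonants (w :: rest) = Gbest w rest := by
  intro rest
  induction rest with
  | nil => intro w; simp [most_consonants, Gbest]
  | cons x xs ih =>
      intro w
      show (if (x :: xs) = [] then w
            else if PySem.Str.len (most_consonants (x :: xs)) - num_vowels (most_consonants (x :: xs))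
                    ≥ PySem.Str.len w - num_vowels w
              then most_consonants (x :: xs) else w) = Gbest w (x :: xs)
      rw [ih x]
      simp only [reduceCtorEq, if_false, ccA_eq_ccount, ge_iff_le]
      rw [G_choice xs w x]
      rfl

-- every element of an ascending-by-ccount list is ≤ its last element
lemma last_is_max : ∀ (acc : List String) (b : String),
    acc.getLast? = some b →
    acc.Pairwise (fun a c => ccount a ≤ ccount c) →
    ∀ y ∈ acc, ccount y ≤ ccount b := by
  intro acc
  induction acc with
  | nil => intro b hb; simp at hb
  | cons a t ih =>
      intro b hb hp y hy
      cases t with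
      | nil =>
          simp at hb hy; subst hb; subst hy; exact le_refl _
      | cons c t' =>
          rw [List.getLast?_cons_cons] at hb
          have hmem : b ∈ c :: t' := List.mem_of_getLast? hb
          rcases List.mem_cons.mp hy with h | h
          · subst h
            exact (List.pairwise_cons.mp hp).1 b hmem
          · exact ih b hb (List.pairwise_cons.mp hp).2 y h

lemma insertBy_ne_nil (x : String) (acc : List String) :
    PySem.List.insertBy (fun a b => decide (ccount a < ccount b)) x acc ≠ [] := by
  cases acc with
  | nil => simp [PySem.List.insertBy]
  | cons y ys => simp only [PySem.List.insertBy]; split <;> simp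

lemma insertBy_last_lt : ∀ (acc : List String) (x b : String),
    acc.getLast? = some b → ccount x < ccount b →
    (PySem.List.insertBy (fun a c => decide (ccount a < ccount c)) x acc).getLast? = some b := by
  intro acc
  induction acc with
  | nil => intro x b hb; simp at hb
  | cons a t ih =>
      intro x b hb hlt
      cases t with
      | nil =>
          simp at hb; subst hb
          simp only [PySem.List.insertBy]
          rw [if_pos (by simpa using hlt)]
          rfl
      | cons c t' =>
          rw [List.getLast?_cons_cons] at hb
          show (if decide (ccount x < ccount a) = true then x :: a :: c :: t'
                else a :: PySem.List.insertBy (fun a c => decide (ccount a < ccount c)) x (c :: t')).getLast? = some b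
          split
          · rw [List.getLast?_cons_cons, List.getLast?_cons_cons]; exact hb
          · have h2 := ih x b hb hlt
            have hne := insertBy_ne_nil x (c :: t')
            cases hins : PySem.List.insertBy (fun a c => decide (ccount a < ccount c)) x (c :: t') with
            | nil => exact absurd hins hne
            | cons z zs =>
                rw [hins] at h2
                rw [List.getLast?_cons_cons]
                exact h2

lemma insertBy_last (acc : List String) (x b : String)
    (hb : acc.getLast? = some b)
    (hp : acc.Pairwise (fun a c => ccount a ≤ ccount c)) :
    (PySem.List.insertBy (fun a c => decide (ccount a < ccount c)) x acc).getLast?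
      = some (gstep b x) := by
  by_cases h : ccount b ≤ ccount x
  · have hall : ∀ y ∈ acc, (fun a c => decide (ccount a < ccount c)) x y = false := by
      intro y hy
      have := last_is_max acc b hb hp y hy
      simp; omega
    rw [PySem.List.insertBy_of_forall_not_before _ _ _ hall]
    simp [gstep, h]
  · rw [insertBy_last_lt acc x b hb (by omega)]
    simp [gstep, h]

lemma foldl_insertBy_last : ∀ (xs acc : List String) (b : String),
    acc.getLast? = some b →
    acc.Pairwise (fun a c => ccount a ≤ ccount c) →
    (xs.foldl (fun acc x => PySem.List.insertBy (fun a c => decide (ccount a < ccount c)) x acc) acc).getLast?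
      = some (Gbest b xs) := by
  intro xs
  induction xs with
  | nil => intro acc b hb _; simpa [Gbest] using hb
  | cons x xs ih =>
      intro acc b hb hp
      simp only [List.foldl_cons]
      have h1 := insertBy_last acc x b hb hp
      have h2 := PySem.List.insertBy_pairwise_le ccount x acc hp
      exact ih _ _ h1 h2

lemma sorted_last (w : String) (rest : List String) :
    (PySem.List.sorted (w :: rest) ccount false).getLast? = some (Gbest w rest) := by
  rw [PySem.List.sorted_eq_foldl_insertBy]
  simp only [List.foldl_cons]
  have h0 : (PySem.List.insertBy (fun a c => decide (ccount a < ccount c)) w []).getLast? = some w := by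
    simp [PySem.List.insertBy]
  exact foldl_insertBy_last rest _ w h0 (by
    show (PySem.List.insertBy (fun a c => decide (ccount a < ccount c)) w []).Pairwise _
    simp [PySem.List.insertBy])

-- ===== VERDICT (by name: the statement is the Claim_ definition above) =====
theorem most_consonants_spec : Claim_equal_most_consonants := by
  intro words _
  show most_consonants words = most_consonants_alt words
  cases words with
  | nil => rfl
  | cons w rest =>
      have hne : PySem.List.sorted (w :: rest) ccount false ≠ [] := by
        rw [Ne, PySem.List.sorted_eq_nil_iff]; simp
      unfold most_consonants_alt
      rw [if_neg (by simp), PySem.List.pyGetD_neg_one _ _ hne]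
      have h1 := sorted_last w rest
      rw [List.getLast?_eq_some_getLast hne] at h1
      have h2 : (PySem.List.sorted (w :: rest) ccount false).getLast hne = Gbest w rest :=
        Option.some_injective _ h1
      rw [h2, A_eq_Gbest]
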